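-- pv_equiv track=rewrite | github.com/Saiteja-Peddi/SecureP2P | crypto.py | fileNameEncryption
-- ===== SOURCE A (Python) =====
-- def fileNameEncryption(data, shift):
--
--     shift = int(shift)
--     i = len(data) - 1
--     reversed = data[::-1]
--     output = ""
--     for i in range(len(reversed)):
--         char = reversed[i]
--         if char.isupper():
--             output += chr((ord(char) + shift-65) % 26 + 65)
--         elif char.islower():
--             output += chr((ord(char) + shift - 97) % 26 + 97)
--         elif char == "/":
--             output += "dskedwaf#emfkww*fsfwref"
--         else:
--             output += char
--
--     return output
-- ===== SOURCE B (Python) =====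
-- _SENT = "dskedwaf#emfkww*fsfwref"
-- _UP = "ABCDEFGHIJKLMNOPQRSTUVWXYZ"
-- _LOW = "abcdefghijklmnopqrstuvwxyz"
--
-- def fileNameEncryption(data, shift):
--     shift = int(shift)
--     k = shift % 26
--     ups = _UP[k:] + _UP[:k]
--     lows = _LOW[k:] + _LOW[:k]
--
--     def caesar(s):
--         return ''.join(ups[ord(c) - 65] if 'A' <= c <= 'Z'
--                        else lows[ord(c) - 97] if 'a' <= c <= 'z'
--                        else c
--                        for c in s)
--
--     parts = data.split('/')
--     return _SENT.join(caesar(p[::-1]) for p in reversed(parts))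
-- ===== Notes on version B (the rewrite author's own statement) =====
-- stated objective: alternative
-- what changed: B splits the name on '/' and joins the pieces with the sentinel string (split/reverse/map/join pipeline) instead of A's single reversed scan with a per-character '/' branch, and does the Caesar step by indexing into alphabets rotated once by shift % 26 instead of per-character modular chr/ord arithmetic.
import Mathlib
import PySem

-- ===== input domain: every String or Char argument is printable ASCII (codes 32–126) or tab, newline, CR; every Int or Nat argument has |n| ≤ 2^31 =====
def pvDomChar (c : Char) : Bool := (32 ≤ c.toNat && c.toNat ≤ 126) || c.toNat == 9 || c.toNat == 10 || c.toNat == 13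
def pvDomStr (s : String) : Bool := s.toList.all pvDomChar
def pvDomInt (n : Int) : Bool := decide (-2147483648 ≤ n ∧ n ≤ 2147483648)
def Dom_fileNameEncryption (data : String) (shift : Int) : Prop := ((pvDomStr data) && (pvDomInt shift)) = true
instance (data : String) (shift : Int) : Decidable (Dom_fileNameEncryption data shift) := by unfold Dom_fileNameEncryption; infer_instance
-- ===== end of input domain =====

-- B handles '/' by split/join instead of a per-character branch, and the Caesar step by
-- indexing into alphabets rotated once by shift % 26 instead of per-character modular
-- arithmetic: a staged split/reverse/map/join pipeline rather than A's reverse-then-scan loop.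

-- ===== PORT A =====
def fileNameEncryption (data : String) (shift : Int) : String :=
  let shift : Int := shift  -- int(shift): identity on an Int argument
  let _i : Int := PySem.Str.len data - 1  -- dead assignment 'i = len(data) - 1' in the source
  let reversed : List Char := (PySem.List.slice? data.toList none none (-1)).getD []  -- data[::-1]
  let output : List Char :=
    (PySem.List.pyRange 0 (PySem.List.len reversed)).foldl (fun output i =>
      let char : Char := PySem.List.pyGetD reversed i ' '
      if PySem.Chars.isupper char then
        output ++ [Char.ofNat (PySem.Int.mod ((char.toNat : Int) + shift - 65) 26 + 65).toNat]
      else if PySem.Chars.islower char then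
        output ++ [Char.ofNat (PySem.Int.mod ((char.toNat : Int) + shift - 97) 26 + 97).toNat]
      else if char = '/' then
        output ++ "dskedwaf#emfkww*fsfwref".toList
      else
        output ++ [char]) []
  String.ofList output

-- ===== PORT B =====
-- module-level constants of Source B
def pvSENT : List Char := "dskedwaf#emfkww*fsfwref".toList
def pvUP : List Char := "ABCDEFGHIJKLMNOPQRSTUVWXYZ".toList
def pvLOW : List Char := "abcdefghijklmnopqrstuvwxyz".toList

-- ups = _UP[k:] + _UP[:k], lows = _LOW[k:] + _LOW[:k] with k = shift % 26
def pvUps (shift : Int) : List Char :=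
  PySem.List.slice pvUP (some (PySem.Int.mod shift 26)) none
    ++ PySem.List.slice pvUP none (some (PySem.Int.mod shift 26))
def pvLows (shift : Int) : List Char :=
  PySem.List.slice pvLOW (some (PySem.Int.mod shift 26)) none
    ++ PySem.List.slice pvLOW none (some (PySem.Int.mod shift 26))

-- the per-character expression of Source B's caesar generator; the index ord(c)-65 / ord(c)-97
-- is always in range for the guarded letter, so pyGetD with a dummy default is exact
def pvCaesarChar (ups lows : List Char) (c : Char) : Char :=
  if 'A' ≤ c ∧ c ≤ 'Z' then PySem.List.pyGetD ups ((c.toNat : Int) - 65) ' '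
  else if 'a' ≤ c ∧ c ≤ 'z' then PySem.List.pyGetD lows ((c.toNat : Int) - 97) ' '
  else c

def fileNameEncryption_alt (data : String) (shift : Int) : String :=
  let shift : Int := shift  -- int(shift): identity on an Int argument
  let ups := pvUps shift
  let lows := pvLows shift
  let parts : List (List Char) := PySem.Chars.splitOn data.toList ['/']  -- data.split('/')
  -- _SENT.join(caesar(p[::-1]) for p in reversed(parts))
  String.ofList (PySem.Chars.join pvSENT
    (parts.reverse.map fun p =>
      ((PySem.List.slice? p none none (-1)).getD []).map (pvCaesarChar ups lows)))

-- ===== PRECONDITION & SPEC =====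
def Spec_fileNameEncryption (data : String) (shift : Int) (out : String) : Prop := out = fileNameEncryption_alt data shift
instance (data : String) (shift : Int) (out : String) : Decidable (Spec_fileNameEncryption data shift out) := by unfold Spec_fileNameEncryption; infer_instance

-- ===== CLAIM (what is proved, stated in full; the proofs are below) =====
def Claim_equal_fileNameEncryption : Prop := ∀ (data : String) (shift : Int), Dom_fileNameEncryption data shift → Spec_fileNameEncryption data shift (fileNameEncryption data shift)

-- ===== LEMMAS AND PROOFS =====

-- A's loop body as a per-character function
def pvBranch (shift : Int) (c : Char) : List Char :=
  if PySem.Chars.isupper c then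
    [Char.ofNat (PySem.Int.mod ((c.toNat : Int) + shift - 65) 26 + 65).toNat]
  else if PySem.Chars.islower c then
    [Char.ofNat (PySem.Int.mod ((c.toNat : Int) + shift - 97) 26 + 97).toNat]
  else if c = '/' then
    "dskedwaf#emfkww*fsfwref".toList
  else
    [c]

lemma pv_isupper_iff (c : Char) : PySem.Chars.isupper c = true ↔ (65 ≤ c.toNat ∧ c.toNat ≤ 90) := by
  simp only [PySem.Chars.isupper, Bool.and_eq_true, decide_eq_true_iff]
  rw [Char.le_def, Char.le_def, UInt32.le_iff_toNat_le, UInt32.le_iff_toNat_le]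
  constructor <;> (rintro ⟨h1, h2⟩; exact ⟨h1, h2⟩)

lemma pv_islower_iff (c : Char) : PySem.Chars.islower c = true ↔ (97 ≤ c.toNat ∧ c.toNat ≤ 122) := by
  simp only [PySem.Chars.islower, Bool.and_eq_true, decide_eq_true_iff]
  rw [Char.le_def, Char.le_def, UInt32.le_iff_toNat_le, UInt32.le_iff_toNat_le]
  constructor <;> (rintro ⟨h1, h2⟩; exact ⟨h1, h2⟩)

lemma pv_charUpper_iff (c : Char) : ('A' ≤ c ∧ c ≤ 'Z') ↔ (65 ≤ c.toNat ∧ c.toNat ≤ 90) := by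
  rw [Char.le_def, Char.le_def, UInt32.le_iff_toNat_le, UInt32.le_iff_toNat_le]
  constructor <;> (rintro ⟨h1, h2⟩; exact ⟨h1, h2⟩)

lemma pv_charLower_iff (c : Char) : ('a' ≤ c ∧ c ≤ 'z') ↔ (97 ≤ c.toNat ∧ c.toNat ≤ 122) := by
  rw [Char.le_def, Char.le_def, UInt32.le_iff_toNat_le, UInt32.le_iff_toNat_le]
  constructor <;> (rintro ⟨h1, h2⟩; exact ⟨h1, h2⟩)

-- A's whole loop is a flatMap of pvBranch over the reversed character list
lemma pv_A_eq_flatMap (data : String) (shift : Int) :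
    fileNameEncryption data shift =
      String.ofList ((data.toList.reverse).flatMap (pvBranch shift)) := by
  unfold fileNameEncryption
  rw [PySem.List.slice?_none_none_neg_one]
  simp only [Option.getD_some]
  have hbody : (fun (output : List Char) (i : Int) =>
      let char : Char := PySem.List.pyGetD data.toList.reverse i ' '
      if PySem.Chars.isupper char then
        output ++ [Char.ofNat (PySem.Int.mod ((char.toNat : Int) + shift - 65) 26 + 65).toNat]
      else if PySem.Chars.islower char then
        output ++ [Char.ofNat (PySem.Int.mod ((char.toNat : Int) + shift - 97) 26 + 97).toNat]
      else if char = '/' then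
        output ++ "dskedwaf#emfkww*fsfwref".toList
      else
        output ++ [char])
      = (fun output i => output ++ pvBranch shift (PySem.List.pyGetD data.toList.reverse i ' ')) := by
    funext output i
    unfold pvBranch
    dsimp only
    split_ifs <;> rfl
  rw [hbody, PySem.List.foldl_pyRange_pyGetD data.toList.reverse ' '
      (fun output char => output ++ pvBranch shift char) [] (by omega)]
  rw [Int.toNat_zero, List.drop_zero, PySem.List.foldl_append_eq_flatMap]
  simp

-- the rotated-alphabet index computes the Caesar character
lemma pv_rot_up : ∀ kn < 26, ∀ i < 26,
    (pvUP.drop kn ++ pvUP.take kn).getD i ' ' = Char.ofNat (65 + (i + kn) % 26) := by decide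

lemma pv_rot_low : ∀ kn < 26, ∀ i < 26,
    (pvLOW.drop kn ++ pvLOW.take kn).getD i ' ' = Char.ofNat (97 + (i + kn) % 26) := by decide

lemma pv_mod_bounds (shift : Int) :
    0 ≤ PySem.Int.mod shift 26 ∧ PySem.Int.mod shift 26 < 26 :=
  ⟨PySem.Int.mod_nonneg shift (by norm_num), PySem.Int.mod_lt shift (by norm_num)⟩

lemma pv_ups_eq (shift : Int) :
    pvUps shift = pvUP.drop (PySem.Int.mod shift 26).toNat ++ pvUP.take (PySem.Int.mod shift 26).toNat := by
  obtain ⟨h0, _⟩ := pv_mod_bounds shift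
  unfold pvUps
  rw [PySem.List.slice_from pvUP h0, PySem.List.slice_to pvUP h0]

lemma pv_lows_eq (shift : Int) :
    pvLows shift = pvLOW.drop (PySem.Int.mod shift 26).toNat ++ pvLOW.take (PySem.Int.mod shift 26).toNat := by
  obtain ⟨h0, _⟩ := pv_mod_bounds shift
  unfold pvLows
  rw [PySem.List.slice_from pvLOW h0, PySem.List.slice_to pvLOW h0]

lemma pv_cc_upper (shift : Int) (c : Char) (h1 : 65 ≤ c.toNat) (h2 : c.toNat ≤ 90) :
    pvCaesarChar (pvUps shift) (pvLows shift) c =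
      Char.ofNat (PySem.Int.mod ((c.toNat : Int) + shift - 65) 26 + 65).toNat := by
  obtain ⟨hk0, hk1⟩ := pv_mod_bounds shift
  unfold pvCaesarChar
  rw [if_pos (pv_charUpper_iff c |>.mpr ⟨h1, h2⟩)]
  rw [pv_ups_eq, PySem.List.pyGetD_of_nonneg _ _ (by omega)]
  rw [pv_rot_up (PySem.Int.mod shift 26).toNat (by omega) ((c.toNat : Int) - 65).toNat (by omega)]
  congr 1
  simp only [PySem.Int.mod_eq_emod_of_pos (by norm_num : (0:Int) < 26)] at *
  omega

lemma pv_cc_lower (shift : Int) (c : Char) (h1 : 97 ≤ c.toNat) (h2 : c.toNat ≤ 122) :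
    pvCaesarChar (pvUps shift) (pvLows shift) c =
      Char.ofNat (PySem.Int.mod ((c.toNat : Int) + shift - 97) 26 + 97).toNat := by
  obtain ⟨hk0, hk1⟩ := pv_mod_bounds shift
  unfold pvCaesarChar
  rw [if_neg (fun h => by have := (pv_charUpper_iff c).mp h; omega)]
  rw [if_pos (pv_charLower_iff c |>.mpr ⟨h1, h2⟩)]
  rw [pv_lows_eq, PySem.List.pyGetD_of_nonneg _ _ (by omega)]
  rw [pv_rot_low (PySem.Int.mod shift 26).toNat (by omega) ((c.toNat : Int) - 97).toNat (by omega)]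
  congr 1
  simp only [PySem.Int.mod_eq_emod_of_pos (by norm_num : (0:Int) < 26)] at *
  omega

-- A's branch chain, expressed through B's per-character function
lemma pv_branch_eq (shift : Int) (c : Char) :
    pvBranch shift c =
      if c = '/' then pvSENT else [pvCaesarChar (pvUps shift) (pvLows shift) c] := by
  unfold pvBranch
  by_cases hu : PySem.Chars.isupper c = true
  · obtain ⟨h1, h2⟩ := (pv_isupper_iff c).mp hu
    have hs : ¬ c = '/' := by rintro rfl; revert h1; decide
    rw [if_pos hu, if_neg hs, pv_cc_upper shift c h1 h2]
  · by_cases hl : PySem.Chars.islower c = true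
    · obtain ⟨h1, h2⟩ := (pv_islower_iff c).mp hl
      have hs : ¬ c = '/' := by rintro rfl; revert h1; decide
      rw [if_neg hu, if_pos hl, if_neg hs, pv_cc_lower shift c h1 h2]
    · rw [if_neg hu, if_neg hl]
      by_cases hs : c = '/'
      · subst hs; rw [if_pos rfl, if_pos rfl]; rfl
      · rw [if_neg hs, if_neg hs]
        unfold pvCaesarChar
        rw [if_neg, if_neg]
        · intro h
          exact hl ((pv_islower_iff c).mpr ((pv_charLower_iff c).mp h))
        · intro h
          exact hu ((pv_isupper_iff c).mpr ((pv_charUpper_iff c).mp h))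

-- the natural recursive split on '/'
def pvSplit : List Char → List (List Char)
  | [] => [[]]
  | c :: r =>
    if c = '/' then [] :: pvSplit r
    else
      match pvSplit r with
      | [] => [[c]]
      | h :: t => (c :: h) :: t

lemma pv_split_cons_struct (l : List Char) : ∃ h t, pvSplit l = h :: t := by
  cases l with
  | nil => exact ⟨[], [], rfl⟩
  | cons c r =>
    unfold pvSplit
    by_cases hc : c = '/'
    · exact ⟨[], pvSplit r, by rw [if_pos hc]⟩
    · rw [if_neg hc]
      rcases hsr : pvSplit r with _ | ⟨h, t⟩
      · exact ⟨[c], [], rfl⟩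
      · exact ⟨c :: h, t, rfl⟩

def pvConsHead (p : List Char) : List (List Char) → List (List Char)
  | [] => [p]
  | h :: t => (p ++ h) :: t

-- splitOn's fuelled worker computes pvSplit
lemma pv_go (fuel : Nat) : ∀ (l cur : List Char) (acc : List (List Char)),
    l.length < fuel →
    PySem.Chars.splitOn.go ['/'] fuel l cur acc = acc.reverse ++ pvConsHead cur.reverse (pvSplit l) := by
  induction fuel with
  | zero => intro l cur acc h; omega
  | succ f ih =>
    intro l cur acc h
    cases l with
    | nil =>
      rw [PySem.Chars.splitOn.go]
      all_goals first | omega | simp [pvSplit, pvConsHead]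
    | cons c rest =>
      rw [PySem.Chars.splitOn.go]
      by_cases hc : c = '/'
      · subst hc
        have hp : List.isPrefixOf ['/'] ('/' :: rest) = true := by
          simp [List.isPrefixOf]
        rw [if_pos hp]
        simp only [List.length_cons, List.drop_succ_cons, List.length_nil, List.drop_zero]
        rw [ih rest [] (cur.reverse :: acc) (by simp at h ⊢; omega)]
        obtain ⟨hh, tt, hst⟩ := pv_split_cons_struct rest
        simp [pvSplit, pvConsHead, hst]
      · have hp : List.isPrefixOf ['/'] (c :: rest) = false := by
          simp [List.isPrefixOf]
          intro h
          exact hc h.symm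
        rw [if_neg (by simp [hp])]
        rw [ih rest (c :: cur) acc (by simp at h ⊢; omega)]
        obtain ⟨hh, tt, hst⟩ := pv_split_cons_struct rest
        simp [pvSplit, pvConsHead, hst, hc]

lemma pv_splitOn_eq (l : List Char) : PySem.Chars.splitOn l ['/'] = pvSplit l := by
  unfold PySem.Chars.splitOn
  rw [pv_go (l.length + 1) l [] [] (by omega)]
  obtain ⟨hh, tt, hst⟩ := pv_split_cons_struct l
  simp [pvConsHead, hst]

lemma pv_intercalate_cons_cons (sep a b : List Char) (l : List (List Char)) :
    List.intercalate sep (a :: b :: l) = a ++ sep ++ List.intercalate sep (b :: l) := by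
  simp [List.intercalate, List.append_assoc]

-- intercalate over a snoc
lemma pv_intercalate_snoc (sep y : List Char) :
    ∀ (xs : List (List Char)), xs ≠ [] →
      List.intercalate sep (xs ++ [y]) = List.intercalate sep xs ++ sep ++ y := by
  intro xs
  induction xs with
  | nil => intro h; exact absurd rfl h
  | cons a xs ih =>
    intro _
    cases xs with
    | nil => simp [List.intercalate]
    | cons b xs =>
      have h3 : (a :: b :: xs) ++ [y] = a :: b :: (xs ++ [y]) := by simp
      have h4 : (b :: xs) ++ [y] = b :: (xs ++ [y]) := by simp
      rw [h3, pv_intercalate_cons_cons, ← h4, ih (by simp), pv_intercalate_cons_cons]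
      simp [List.append_assoc]

-- extending the last part extends the joined string
lemma pv_intercalate_last (sep y e : List Char) (xs : List (List Char)) :
    List.intercalate sep (xs ++ [y ++ e]) = List.intercalate sep (xs ++ [y]) ++ e := by
  cases xs with
  | nil => simp [List.intercalate]
  | cons a xs =>
    rw [pv_intercalate_snoc sep (y ++ e) (a :: xs) (by simp),
        pv_intercalate_snoc sep y (a :: xs) (by simp)]
    simp [List.append_assoc]

-- the main correspondence: B's split/reverse/map/join pipeline equals A's reversed flatMap
lemma pv_main (shift : Int) (l : List Char) :
    List.intercalate pvSENT
        ((pvSplit l).reverse.map fun p => p.reverse.map (pvCaesarChar (pvUps shift) (pvLows shift))) =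
      l.reverse.flatMap (pvBranch shift) := by
  induction l with
  | nil => simp [pvSplit, List.intercalate]
  | cons c r ih =>
    rw [List.reverse_cons, List.flatMap_append, ← ih]
    by_cases hc : c = '/'
    · subst hc
      have hs : pvSplit ('/' :: r) = [] :: pvSplit r := by simp [pvSplit]
      rw [hs, List.reverse_cons, List.map_append]
      obtain ⟨hh, tt, hst⟩ := pv_split_cons_struct r
      have hne : ((pvSplit r).reverse.map fun p => p.reverse.map (pvCaesarChar (pvUps shift) (pvLows shift))) ≠ [] := by
        simp [hst]
      rw [show (([] : List Char) :: []).map (fun p => p.reverse.map (pvCaesarChar (pvUps shift) (pvLows shift))) = [[]] from rfl]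
      rw [pv_intercalate_snoc _ _ _ hne]
      simp [List.flatMap_cons, pv_branch_eq]
    · obtain ⟨hh, tt, hst⟩ := pv_split_cons_struct r
      have hs : pvSplit (c :: r) = (c :: hh) :: tt := by simp [pvSplit, hc, hst]
      rw [hs, hst, List.reverse_cons, List.reverse_cons, List.map_append, List.map_append]
      have hlast : ((c :: hh) :: []).map (fun p => p.reverse.map (pvCaesarChar (pvUps shift) (pvLows shift))) =
          [hh.reverse.map (pvCaesarChar (pvUps shift) (pvLows shift)) ++
            [pvCaesarChar (pvUps shift) (pvLows shift) c]] := by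
        simp
      rw [hlast, pv_intercalate_last]
      simp [List.flatMap_cons, pv_branch_eq, hc]

-- ===== VERDICT (by name: the statement is the Claim_ definition above) =====
theorem fileNameEncryption_spec : Claim_equal_fileNameEncryption := by
  intro data shift _hdom
  unfold Spec_fileNameEncryption
  rw [pv_A_eq_flatMap]
  unfold fileNameEncryption_alt
  simp only [pv_splitOn_eq, PySem.List.slice?_none_none_neg_one, Option.getD_some,
    PySem.Chars.join]
  rw [pv_main shift data.toList]
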